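-- pv_equiv track=rewrite | github.com/hanzo-21/pythonPrtice | python interview/Extend the Vowels.py | vowel_repeater
-- ===== SOURCE A (Python) =====
-- def vowel_repeater(string, n):
--
--     result = ""
--     vowels = "AEIOUaeiou"
--
--     for char in string:
--         if vowels.__contains__(char):
--             for i in range(n):
--                 result += char
--         else:
--             result+=char
--     return result
-- ===== SOURCE B (Python) =====
-- def vowel_repeater(string, n):
--     table = {ord(v): v * n for v in "AEIOUaeiou" if v in string}
--     return string.translate(table)
-- ===== Notes on version B (the rewrite author's own statement) =====
-- stated objective: idiomatic
-- what changed: Replaces the accumulator loop with an inner per-vowel counting loop by a precomputed codepoint->replacement translation table applied with str.translate.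
import Mathlib
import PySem

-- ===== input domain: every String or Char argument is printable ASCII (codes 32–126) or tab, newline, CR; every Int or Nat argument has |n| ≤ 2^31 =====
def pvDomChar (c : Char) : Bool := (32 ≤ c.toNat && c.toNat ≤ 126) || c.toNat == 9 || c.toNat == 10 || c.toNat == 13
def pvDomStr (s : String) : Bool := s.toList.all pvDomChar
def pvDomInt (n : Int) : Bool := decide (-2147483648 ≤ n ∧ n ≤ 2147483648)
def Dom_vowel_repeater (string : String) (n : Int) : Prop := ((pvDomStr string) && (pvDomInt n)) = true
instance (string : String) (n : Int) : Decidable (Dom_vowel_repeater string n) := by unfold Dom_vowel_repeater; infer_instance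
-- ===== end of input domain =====

-- B replaces A's accumulator loop (inner counting loop per vowel) by a precomputed codepoint->string
-- translation table (for the vowels present in the input) applied with str.translate; return values are equal on all inputs.
-- ===== PORT A =====
def pvAStep (n : Int) (result : List Char) (char : Char) : List Char :=
  if char ∈ "AEIOUaeiou".toList then
    (PySem.List.pyRange 0 n 1).foldl (fun result _ => result ++ [char]) result
  else
    result ++ [char]

def vowel_repeater (string : String) (n : Int) : String :=
  String.ofList (string.toList.foldl (pvAStep n) [])

-- ===== PORT B =====
-- table = {ord(v): v * n for v in "AEIOUaeiou" if v in string}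
def pvTable (string : List Char) (n : Int) : PySem.Dict Int (List Char) :=
  ("AEIOUaeiou".toList.filter (fun v => v ∈ string)).foldl
    (fun d v => d.insert (v.toNat : Int) (List.replicate n.toNat v)) PySem.Dict.empty

-- string.translate(table): each char whose codepoint is a key is replaced by the mapped string,
-- others pass through unchanged (exact for this use: all table values are strings).
def pvTranslate (s : List Char) (table : PySem.Dict Int (List Char)) : List Char :=
  s.flatMap (fun c => (table.get? (c.toNat : Int)).getD [c])

def vowel_repeater_alt (string : String) (n : Int) : String :=
  String.ofList (pvTranslate string.toList (pvTable string.toList n))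

-- ===== PRECONDITION & SPEC =====
def Spec_vowel_repeater (string : String) (n : Int) (out : String) : Prop := out = vowel_repeater_alt string n
instance (string : String) (n : Int) (out : String) : Decidable (Spec_vowel_repeater string n out) := by unfold Spec_vowel_repeater; infer_instance

-- ===== CLAIM (what is proved, stated in full; the proofs are below) =====
def Claim_equal_vowel_repeater : Prop := ∀ (string : String) (n : Int), Dom_vowel_repeater string n → Spec_vowel_repeater string n (vowel_repeater string n)

-- ===== LEMMAS AND PROOFS =====
lemma pv_foldl_append (c : Char) (L : List Int) (acc : List Char) :
    L.foldl (fun r _ => r ++ [c]) acc = acc ++ List.replicate L.length c := by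
  induction L generalizing acc with
  | nil => simp
  | cons x xs ih =>
    simp [List.foldl, ih]
    rw [← List.replicate_succ, List.replicate_succ']

lemma pv_code_ne {c v : Char} (h : c ≠ v) : (c.toNat : Int) ≠ (v.toNat : Int) := by
  intro hEq
  apply h
  have hn : c.toNat = v.toNat := by exact_mod_cast hEq
  exact Char.ext (UInt32.toNat_inj.mp hn)

lemma pv_items_table (s : List Char) (n : Int) :
    (pvTable s n).items = ("AEIOUaeiou".toList.filter (fun v => v ∈ s)).map
      (fun v => ((v.toNat : Int), List.replicate n.toNat v)) := by
  unfold pvTable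
  rw [PySem.Dict.items_foldl_insert_fresh]
  · simp [PySem.Dict.empty]
  · intro a _
    exact PySem.Dict.contains_empty _
  · have hsub : (("AEIOUaeiou".toList.filter (fun v => v ∈ s)).map
        (fun v => (v.toNat : Int))).Sublist ("AEIOUaeiou".toList.map (fun v => (v.toNat : Int))) :=
      List.Sublist.map _ List.filter_sublist
    exact List.Nodup.sublist hsub (by decide)

lemma pv_keys_table_nodup (s : List Char) (n : Int) : (pvTable s n).keys.Nodup := by
  have : (pvTable s n).keys = ("AEIOUaeiou".toList.filter (fun v => v ∈ s)).map
      (fun v => (v.toNat : Int)) := by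
    simp only [PySem.Dict.keys, pv_items_table, List.map_map]
    rfl
  rw [this]
  exact List.Nodup.sublist (List.Sublist.map _ List.filter_sublist) (by decide)

lemma pv_table_get (s : List Char) (n : Int) (c : Char) (hc : c ∈ s) :
    (pvTable s n).get? (c.toNat : Int) =
      if c ∈ "AEIOUaeiou".toList then some (List.replicate n.toNat c) else none := by
  by_cases h : c ∈ "AEIOUaeiou".toList
  · simp only [h, if_pos]
    apply PySem.Dict.get?_of_mem_items
    · rw [pv_items_table]
      exact List.mem_map.mpr ⟨c, List.mem_filter.mpr ⟨h, by simpa using hc⟩, rfl⟩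
    · exact pv_keys_table_nodup s n
  · simp only [h, if_neg, not_false_iff]
    rw [PySem.Dict.get?_eq_none_iff_not_mem_keys]
    intro hmem
    have hkeys : (pvTable s n).keys = ("AEIOUaeiou".toList.filter (fun v => v ∈ s)).map
        (fun v => (v.toNat : Int)) := by
      simp only [PySem.Dict.keys, pv_items_table, List.map_map]
      rfl
    rw [hkeys] at hmem
    obtain ⟨v, hv, hveq⟩ := List.mem_map.mp hmem
    have hvv : v ∈ "AEIOUaeiou".toList := (List.mem_filter.mp hv).1
    have hne : c ≠ v := fun e => h (e ▸ hvv)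
    exact pv_code_ne hne hveq.symm

lemma pv_step_eq (s : List Char) (n : Int) (acc : List Char) (c : Char) (hc : c ∈ s) :
    pvAStep n acc c = acc ++ ((pvTable s n).get? (c.toNat : Int)).getD [c] := by
  unfold pvAStep
  rw [pv_table_get s n c hc]
  split
  · rw [pv_foldl_append, PySem.List.length_pyRange_one]
    simp
  · simp

lemma pv_foldl_eq_translate (s : List Char) (n : Int) (l : List Char) (acc : List Char)
    (hl : ∀ c ∈ l, c ∈ s) :
    l.foldl (pvAStep n) acc = acc ++ pvTranslate l (pvTable s n) := by
  induction l generalizing acc with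
  | nil => simp [pvTranslate]
  | cons x xs ih =>
    have hx : x ∈ s := hl x (List.mem_cons_self)
    simp only [List.foldl, pvTranslate, List.flatMap_cons]
    rw [pv_step_eq s n acc x hx, ih _ (fun c hc => hl c (List.mem_cons_of_mem _ hc))]
    simp [pvTranslate, List.append_assoc]

-- ===== VERDICT (by name: the statement is the Claim_ definition above) =====
theorem vowel_repeater_spec : Claim_equal_vowel_repeater := by
  intro string n _
  unfold Spec_vowel_repeater vowel_repeater vowel_repeater_alt
  rw [pv_foldl_eq_translate string.toList n string.toList [] (fun _ h => h)]
  simp
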